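-- pv_equiv track=rewrite | github.com/vinchinzu/euler | python/360.py | compute_s_optimized
-- ===== SOURCE A (Python) =====
-- def validate_radius(r: int) -> int:
--     """Validate that r is a non-negative integer; return it or raise ValueError."""
--
--     if not isinstance(r, int) or r < 0:
--         msg = "Radius must be a non-negative integer"
--         raise ValueError(msg)
--     return r
--
-- def _two_squares_representation_count(n: int) -> int:
--     """Return the number of representations of n as x^2 + y^2.
--
--     This mirrors the Ruby logic based on number-theoretic properties:
--     - If any prime ≡ 3 (mod 4) divides n to an odd power, the count is 0.
--     - Otherwise, count is 4 * (d1 - d3), where d1 and d3 are the counts of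
--       divisors of n that are ≡ 1 and ≡ 3 (mod 4), respectively.
--
--     Note: For this problem we only require consistency with the original
--     implementation, not asymptotically optimal factorization.
--     """
--
--     if n < 0:
--         return 0
--     if n == 0:
--         # (0, 0) is one way.
--         return 1
--
--     # Remove factors of 2.
--     while n % 2 == 0:
--         n //= 2
--
--     # Check primes ≡ 3 (mod 4) for odd exponent.
--     i = 3
--     tmp = n
--     while i * i <= tmp:
--         if tmp % i == 0:
--             count = 0
--             while tmp % i == 0:
--                 tmp //= i
--                 count += 1
--             if i % 4 == 3 and count % 2 == 1:
--                 return 0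
--         i += 2
--
--     # If remaining prime factor is ≡ 3 (mod 4), then invalid.
--     if tmp > 1 and tmp % 4 == 3:
--         return 0
--
--     # Count divisors of the original n by reconstructing from tmp is non-trivial.
--     # To stay faithful to the Ruby version (which recomputed divisors on n after
--     # its checks), we follow its structure: recompute divisors on the filtered n.
--
--     # At this point, `n` has only primes ≡ 1 (mod 4) or 2.
--     divisors: list[int] = []
--     i = 1
--     while i * i <= n:
--         if n % i == 0:
--             divisors.append(i)
--             j = n // i
--             if j != i:
--                 divisors.append(j)
--         i += 1
--
--     d1 = sum(1 for d in divisors if d % 4 == 1)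
--     d3 = sum(1 for d in divisors if d % 4 == 3)
--     return 4 * (d1 - d3)
--
-- def compute_s_optimized(r: int) -> int:
--     """Compute S(r) using an optimized approach based on two-square representations.
--
--     Suitable for very large radii such as 10**10.
--     """
--
--     r = validate_radius(r)
--     if r == 0:
--         return 0
--
--     r_squared = r * r
--     total_sum = 0
--
--     for x in range(1, r + 1):
--         remaining = r_squared - x * x
--         if remaining < 0:
--             break
--         r2 = _two_squares_representation_count(remaining)
--         # Factor 6: symmetry over axes/octants for Manhattan distance contribution.
--         total_sum += 6 * x * r2
--
--     return total_sum
-- ===== SOURCE B (Python) =====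
-- def compute_s_optimized(r: int) -> int:
--     """Compute S(r) = sum over x of 6*x*r2(r^2-x^2), with r2 obtained from a
--     single trial-division factorization (multiplicative formula) instead of
--     enumerating divisors."""
--     if not isinstance(r, int) or r < 0:
--         raise ValueError("Radius must be a non-negative integer")
--     r_squared = r * r
--     total = 0
--     for x in range(1, r + 1):
--         total += 6 * x * _r2_by_factorization(r_squared - x * x)
--     return total
--
--
-- def _r2_by_factorization(n: int) -> int:
--     """Number of (a, b) in Z^2 with a^2 + b^2 = n, for n >= 0, computed as
--     4 * prod(e_p + 1 for p = 1 mod 4) over the factorization of n, and 0 if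
--     some prime = 3 mod 4 divides n to an odd power."""
--     if n == 0:
--         return 1
--     while n % 2 == 0:
--         n //= 2
--     prod = 1
--     i = 3
--     while i * i <= n:
--         if n % i == 0:
--             e = 0
--             while n % i == 0:
--                 n //= i
--                 e += 1
--             if i % 4 == 3:
--                 if e % 2 == 1:
--                     return 0
--             else:
--                 prod *= e + 1
--         i += 2
--     if n > 1:
--         if n % 4 == 3:
--             return 0
--         prod *= 2
--     return 4 * prod
-- ===== Notes on version B (the rewrite author's own statement) =====
-- stated objective: alternative
-- what changed: The per-term two-squares count is computed from a single trial-division factorization that multiplies exponent-plus-one over primes congruent to one mod four (aborting on an odd exponent of a prime congruent to three mod four), instead of A's separate prime check followed by a full square-root-bounded divisor enumeration and two filter passes over the divisor list.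
import Mathlib
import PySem

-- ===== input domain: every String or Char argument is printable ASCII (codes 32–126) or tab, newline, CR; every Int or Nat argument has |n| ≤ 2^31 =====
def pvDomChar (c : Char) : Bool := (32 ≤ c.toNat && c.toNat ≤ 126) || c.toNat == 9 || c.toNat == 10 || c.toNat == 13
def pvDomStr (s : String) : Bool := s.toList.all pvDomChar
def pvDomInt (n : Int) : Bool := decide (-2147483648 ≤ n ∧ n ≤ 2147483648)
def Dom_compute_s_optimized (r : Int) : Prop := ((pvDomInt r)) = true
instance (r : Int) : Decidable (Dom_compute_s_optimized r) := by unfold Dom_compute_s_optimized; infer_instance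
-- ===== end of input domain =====

-- B replaces A's per-term divisor enumeration (trial-division check, then a full divisor scan and
-- two filter passes) by a single trial-division factorization accumulating the multiplicative
-- divisor-difference count directly; equal return values are proved for every nonnegative r.

-- ===== PORT A =====
-- while n % 2 == 0: n //= 2   (fuel only makes the loop total; n.toNat+1 always suffices)
def pvAStrip : Nat → Int → Int
  | 0, n => n
  | f+1, n => if PySem.Int.mod n 2 = 0 then pvAStrip f (PySem.Int.floordiv n 2) else n

def pvADivOut : Nat → Int → Int → Int → Int × Int
  | 0, tmp, _, count => (tmp, count)
  | f+1, tmp, i, count =>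
    if PySem.Int.mod tmp i = 0 then pvADivOut f (PySem.Int.floordiv tmp i) i (count + 1)
    else (tmp, count)

def pvACheck : Nat → Int → Int → Option Int
  | 0, _, tmp => some tmp
  | f+1, i, tmp =>
    if i * i ≤ tmp then
      (if PySem.Int.mod tmp i = 0 then
        let p := pvADivOut (tmp.toNat + 1) tmp i 0
        if PySem.Int.mod i 4 = 3 ∧ PySem.Int.mod p.2 2 = 1 then none
        else pvACheck f (i + 2) p.1
      else pvACheck f (i + 2) tmp)
    else some tmp

def pvADivisors : Nat → Int → Int → List Int → List Int
  | 0, _, _, acc => acc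
  | f+1, i, n, acc =>
    if i * i ≤ n then
      (if PySem.Int.mod n i = 0 then
        let j := PySem.Int.floordiv n i
        pvADivisors f (i + 1) n (if j ≠ i then acc ++ [i, j] else acc ++ [i])
      else pvADivisors f (i + 1) n acc)
    else acc

def pvAR2 (n : Int) : Int :=
  if n < 0 then 0
  else if n = 0 then 1
  else
    let n1 := pvAStrip (n.toNat + 1) n
    match pvACheck (n.toNat + 2) 3 n1 with
    | none => 0
    | some tmp =>
      if 1 < tmp ∧ PySem.Int.mod tmp 4 = 3 then 0
      else
        let ds := pvADivisors (n.toNat + 2) 1 n1 []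
        let d1 : Int := ((ds.filter (fun d => PySem.Int.mod d 4 == 1)).length : Int)
        let d3 : Int := ((ds.filter (fun d => PySem.Int.mod d 4 == 3)).length : Int)
        4 * (d1 - d3)

def pvALoop (rsq : Int) : List Int → Int → Int
  | [], tot => tot
  | x :: xs, tot =>
    let rem := rsq - x * x
    if rem < 0 then tot else pvALoop rsq xs (tot + 6 * x * pvAR2 rem)

def compute_s_optimized (r : Int) : Int :=
  if r < 0 then 0
  else if r = 0 then 0
  else pvALoop (r * r) (PySem.List.pyRange 1 (r + 1) 1) 0

-- ===== PORT B =====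

-- ===== PORT B =====
def pvBStrip : Nat → Int → Int
  | 0, n => n
  | f+1, n => if PySem.Int.mod n 2 = 0 then pvBStrip f (PySem.Int.floordiv n 2) else n

def pvBDivOut : Nat → Int → Int → Int → Int × Int
  | 0, t, _, e => (t, e)
  | f+1, t, i, e =>
    if PySem.Int.mod t i = 0 then pvBDivOut f (PySem.Int.floordiv t i) i (e + 1) else (t, e)

def pvBFact : Nat → Int → Int → Int → Option (Int × Int)
  | 0, _, n, prod => some (n, prod)
  | f+1, i, n, prod =>
    if i * i ≤ n then
      (if PySem.Int.mod n i = 0 then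
        let p := pvBDivOut (n.toNat + 1) n i 0
        if PySem.Int.mod i 4 = 3 then
          (if PySem.Int.mod p.2 2 = 1 then none else pvBFact f (i + 2) p.1 prod)
        else pvBFact f (i + 2) p.1 (prod * (p.2 + 1))
      else pvBFact f (i + 2) n prod)
    else some (n, prod)

def pvBR2 (n : Int) : Int :=
  if n = 0 then 1
  else
    let n1 := pvBStrip (n.toNat + 1) n
    match pvBFact (n.toNat + 2) 3 n1 1 with
    | none => 0
    | some (m, prod) =>
      if 1 < m then (if PySem.Int.mod m 4 = 3 then 0 else 4 * (prod * 2))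
      else 4 * prod

def pvBLoop (rsq : Int) : List Int → Int → Int
  | [], tot => tot
  | x :: xs, tot => pvBLoop rsq xs (tot + 6 * x * pvBR2 (rsq - x * x))

def compute_s_optimized_alt (r : Int) : Int :=
  if r < 0 then 0
  else pvBLoop (r * r) (PySem.List.pyRange 1 (r + 1) 1) 0


-- ===== PRECONDITION & SPEC =====
-- Pre_ excludes exactly r < 0, where Python A raises ValueError in validate_radius.
def Pre_compute_s_optimized (r : Int) : Prop := 0 ≤ r
instance (r : Int) : Decidable (Pre_compute_s_optimized r) := by unfold Pre_compute_s_optimized; infer_instance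
def pvWitness_compute_s_optimized : Int := 10
def Spec_compute_s_optimized (r : Int) (out : Int) : Prop := out = compute_s_optimized_alt r
instance (r : Int) (out : Int) : Decidable (Spec_compute_s_optimized r out) := by unfold Spec_compute_s_optimized; infer_instance

-- ===== CLAIM (what is proved, stated in full; the proofs are below) =====
def Claim_equal_compute_s_optimized : Prop := ∀ (r : Int), Dom_compute_s_optimized r → Pre_compute_s_optimized r → Spec_compute_s_optimized r (compute_s_optimized r)

-- ===== LEMMAS AND PROOFS =====

def pvStripN : Nat → Nat → Nat
  | 0, n => n
  | f+1, n => if n % 2 = 0 then pvStripN f (n / 2) else n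

def pvDivOutN : Nat → Nat → Nat → Nat → Nat × Nat
  | 0, t, _, c => (t, c)
  | f+1, t, i, c => if t % i = 0 then pvDivOutN f (t / i) i (c + 1) else (t, c)

theorem pvAStrip_natCast (f : Nat) (n : Nat) : pvAStrip f (n : Int) = (pvStripN f n : Int) := by
  induction f generalizing n with
  | zero => rfl
  | succ f ih =>
    simp only [pvAStrip, pvStripN]
    rw [show ((2:Int) = ((2:Nat):Int)) by norm_num, PySem.Int.mod_natCast, PySem.Int.floordiv_natCast]
    by_cases h : n % 2 = 0
    · rw [if_pos (by exact_mod_cast h), if_pos h]; exact ih _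
    · rw [if_neg (by exact_mod_cast h), if_neg h]

theorem pvADivOut_natCast (f : Nat) (t i c : Nat) :
    pvADivOut f (t : Int) (i : Int) (c : Int) = (((pvDivOutN f t i c).1 : Int), ((pvDivOutN f t i c).2 : Int)) := by
  induction f generalizing t c with
  | zero => rfl
  | succ f ih =>
    simp only [pvADivOut, pvDivOutN]
    rw [PySem.Int.mod_natCast, PySem.Int.floordiv_natCast]
    by_cases h : t % i = 0
    · rw [if_pos (by exact_mod_cast h), if_pos h, show ((c:Int) + 1 = ((c+1 : Nat) : Int)) by push_cast; ring]
      exact ih _ _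
    · rw [if_neg (by exact_mod_cast h), if_neg h]

def pvCheckN : Nat → Nat → Nat → Option Nat
  | 0, _, t => some t
  | f+1, i, t =>
    if i * i ≤ t then
      (if t % i = 0 then
        let p := pvDivOutN (t + 1) t i 0
        if i % 4 = 3 ∧ p.2 % 2 = 1 then none
        else pvCheckN f (i + 2) p.1
      else pvCheckN f (i + 2) t)
    else some t

theorem pvACheck_natCast (f : Nat) (i t : Nat) :
    pvACheck f (i : Int) (t : Int) = (pvCheckN f i t).map (fun (m : Nat) => (m : Int)) := by
  induction f generalizing i t with
  | zero => rfl
  | succ f ih =>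
    simp only [pvACheck, pvCheckN]
    rw [PySem.Int.mod_natCast,
      show ((4:Int) = ((4:Nat):Int)) by norm_num, PySem.Int.mod_natCast,
      show ((i:Int) * (i:Int) = ((i*i : Nat) : Int)) by push_cast; ring]
    by_cases hg : i * i ≤ t
    · rw [if_pos (by exact_mod_cast hg), if_pos hg]
      by_cases hd : t % i = 0
      · rw [if_pos (by exact_mod_cast hd), if_pos hd]
        have hb := pvADivOut_natCast (t + 1) t i 0
        push_cast at hb
        simp only [Int.toNat_natCast]
        rw [hb]
        rw [show ((2:Int) = ((2:Nat):Int)) by norm_num, PySem.Int.mod_natCast]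
        by_cases h3 : i % 4 = 3 ∧ (pvDivOutN (t + 1) t i 0).2 % 2 = 1
        · rw [if_pos ⟨by exact_mod_cast h3.1, by exact_mod_cast h3.2⟩, if_pos h3]; rfl
        · rw [if_neg (fun hh => h3 ⟨by exact_mod_cast hh.1, by exact_mod_cast hh.2⟩), if_neg h3,
            show ((i:Int) + ((2:Nat):Int) = ((i+2 : Nat) : Int)) by push_cast; ring]
          exact ih _ _
      · rw [if_neg (by exact_mod_cast hd), if_neg hd,
          show ((i:Int) + 2 = ((i+2 : Nat) : Int)) by push_cast; ring]
        exact ih _ _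
    · rw [if_neg (by exact_mod_cast hg), if_neg hg]; rfl

def pvDivisorsN : Nat → Nat → Nat → List Nat → List Nat
  | 0, _, _, acc => acc
  | f+1, i, n, acc =>
    if i * i ≤ n then
      (if n % i = 0 then
        pvDivisorsN f (i + 1) n (if n / i ≠ i then acc ++ [i, n / i] else acc ++ [i])
      else pvDivisorsN f (i + 1) n acc)
    else acc

def pvCastL (l : List Nat) : List Int := l.map (fun (d : Nat) => (d : Int))

theorem pvCastL_nil : pvCastL [] = [] := rfl

theorem pvADivisors_natCast (f : Nat) (i n : Nat) (acc : List Nat) :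
    pvADivisors f (i : Int) (n : Int) (pvCastL acc) = pvCastL (pvDivisorsN f i n acc) := by
  induction f generalizing i acc with
  | zero => rfl
  | succ f ih =>
    simp only [pvADivisors, pvDivisorsN]
    rw [PySem.Int.mod_natCast, PySem.Int.floordiv_natCast,
      show ((i:Int) * (i:Int) = ((i*i : Nat) : Int)) by push_cast; ring]
    by_cases hg : i * i ≤ n
    · rw [if_pos (by exact_mod_cast hg), if_pos hg]
      by_cases hd : n % i = 0
      · rw [if_pos (by exact_mod_cast hd), if_pos hd,
          show ((i:Int) + 1 = ((i+1 : Nat) : Int)) by push_cast; ring]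
        by_cases hj : n / i = i
        · rw [if_neg (by simpa using (by exact_mod_cast hj : ((n/i : Nat):Int) = (i:Int))), if_neg (by simpa using hj)]
          rw [show (pvCastL acc ++ [(i:Int)]) = pvCastL (acc ++ [i]) by simp [pvCastL]]
          exact ih _ _
        · rw [if_pos (by simpa using (fun hh : ((n/i : Nat):Int) = (i:Int) => hj (by exact_mod_cast hh))), if_pos (by simpa using hj)]
          rw [show (pvCastL acc ++ [(i:Int), ((n/i : Nat):Int)]) = pvCastL (acc ++ [i, n/i]) by simp [pvCastL]]
          exact ih _ _
      · rw [if_neg (by exact_mod_cast hd), if_neg hd,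
          show ((i:Int) + 1 = ((i+1 : Nat) : Int)) by push_cast; ring]
        exact ih _ _
    · rw [if_neg (by exact_mod_cast hg), if_neg hg]

def pvFactN : Nat → Nat → Nat → Nat → Option (Nat × Nat)
  | 0, _, n, prod => some (n, prod)
  | f+1, i, n, prod =>
    if i * i ≤ n then
      (if n % i = 0 then
        let p := pvDivOutN (n + 1) n i 0
        if i % 4 = 3 then
          (if p.2 % 2 = 1 then none else pvFactN f (i + 2) p.1 prod)
        else pvFactN f (i + 2) p.1 (prod * (p.2 + 1))
      else pvFactN f (i + 2) n prod)
    else some (n, prod)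

theorem pvBStrip_natCast (f : Nat) (n : Nat) : pvBStrip f (n : Int) = (pvStripN f n : Int) := by
  induction f generalizing n with
  | zero => rfl
  | succ f ih =>
    simp only [pvBStrip, pvStripN]
    rw [show ((2:Int) = ((2:Nat):Int)) by norm_num, PySem.Int.mod_natCast, PySem.Int.floordiv_natCast]
    by_cases h : n % 2 = 0
    · rw [if_pos (by exact_mod_cast h), if_pos h]; exact ih _
    · rw [if_neg (by exact_mod_cast h), if_neg h]

theorem pvBDivOut_natCast (f : Nat) (t i c : Nat) :
    pvBDivOut f (t : Int) (i : Int) (c : Int) = (((pvDivOutN f t i c).1 : Int), ((pvDivOutN f t i c).2 : Int)) := by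
  induction f generalizing t c with
  | zero => rfl
  | succ f ih =>
    simp only [pvBDivOut, pvDivOutN]
    rw [PySem.Int.mod_natCast, PySem.Int.floordiv_natCast]
    by_cases h : t % i = 0
    · rw [if_pos (by exact_mod_cast h), if_pos h, show ((c:Int) + 1 = ((c+1 : Nat) : Int)) by push_cast; ring]
      exact ih _ _
    · rw [if_neg (by exact_mod_cast h), if_neg h]

theorem pvBFact_natCast (f : Nat) (i n p : Nat) :
    pvBFact f (i : Int) (n : Int) (p : Int)
      = (pvFactN f i n p).map (fun (q : Nat × Nat) => ((q.1 : Int), (q.2 : Int))) := by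
  induction f generalizing i n p with
  | zero => rfl
  | succ f ih =>
    simp only [pvBFact, pvFactN]
    rw [PySem.Int.mod_natCast,
      show ((4:Int) = ((4:Nat):Int)) by norm_num, PySem.Int.mod_natCast,
      show ((i:Int) * (i:Int) = ((i*i : Nat) : Int)) by push_cast; ring]
    by_cases hg : i * i ≤ n
    · rw [if_pos (by exact_mod_cast hg), if_pos hg]
      by_cases hd : n % i = 0
      · rw [if_pos (by exact_mod_cast hd), if_pos hd]
        have hb := pvBDivOut_natCast (n + 1) n i 0
        push_cast at hb
        simp only [Int.toNat_natCast]
        rw [hb]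
        by_cases h3 : i % 4 = 3
        · rw [if_pos (by exact_mod_cast h3), if_pos h3,
            show ((2:Int) = ((2:Nat):Int)) by norm_num, PySem.Int.mod_natCast]
          by_cases he : (pvDivOutN (n + 1) n i 0).2 % 2 = 1
          · rw [if_pos (by exact_mod_cast he), if_pos he]; rfl
          · rw [if_neg (by intro hh; exact he (by exact_mod_cast hh)), if_neg he,
              show ((i:Int) + ((2:Nat):Int) = ((i+2 : Nat) : Int)) by push_cast; ring]
            exact ih _ _ _
        · rw [if_neg (by intro hh; exact h3 (by exact_mod_cast hh)), if_neg h3,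
            show ((i:Int) + 2 = ((i+2 : Nat) : Int)) by push_cast; ring,
            show ((p:Int) * ((((pvDivOutN (n + 1) n i 0).2 : Nat) : Int) + 1) = (((p * ((pvDivOutN (n + 1) n i 0).2 + 1) : Nat)) : Int)) by push_cast; ring]
          exact ih _ _ _
      · rw [if_neg (by exact_mod_cast hd), if_neg hd,
          show ((i:Int) + 2 = ((i+2 : Nat) : Int)) by push_cast; ring]
        exact ih _ _ _
    · rw [if_neg (by exact_mod_cast hg), if_neg hg]; rfl

-- ===== math layer =====
def pvChi (d : Nat) : Int := if d % 4 = 1 then 1 else if d % 4 = 3 then -1 else 0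

def pvF (n : Nat) : Int := ∑ d ∈ n.divisors, pvChi d

theorem pvChi_mul (a b : Nat) : pvChi (a * b) = pvChi a * pvChi b := by
  have ha : a % 4 = 0 ∨ a % 4 = 1 ∨ a % 4 = 2 ∨ a % 4 = 3 := by omega
  have hb : b % 4 = 0 ∨ b % 4 = 1 ∨ b % 4 = 2 ∨ b % 4 = 3 := by omega
  unfold pvChi
  rw [Nat.mul_mod]
  rcases ha with h|h|h|h <;> rcases hb with h'|h'|h'|h' <;> simp [h, h']

theorem pvChi_one : pvChi 1 = 1 := by decide

theorem pvChi_pow (p k : Nat) : pvChi (p ^ k) = pvChi p ^ k := by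
  induction k with
  | zero => simpa using pvChi_one
  | succ k ih => rw [pow_succ, pow_succ, pvChi_mul, ih]

def pvChiF : ArithmeticFunction Int := ⟨fun n => pvChi n, by simp [pvChi]⟩

theorem pvChiF_isMult : pvChiF.IsMultiplicative :=
  ⟨pvChi_one, fun {m n} _ => pvChi_mul m n⟩

theorem pvF_apply (n : Nat) :
    pvF n = (((ArithmeticFunction.zeta : ArithmeticFunction Nat) : ArithmeticFunction Int) * pvChiF) n := by
  rw [ArithmeticFunction.coe_zeta_mul_apply]
  rfl

theorem pvF_isMult :
    (((ArithmeticFunction.zeta : ArithmeticFunction Nat) : ArithmeticFunction Int) * pvChiF).IsMultiplicative :=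
  ArithmeticFunction.isMultiplicative_zeta.natCast.mul pvChiF_isMult

theorem pvF_mul {m n : Nat} (h : Nat.Coprime m n) : pvF (m * n) = pvF m * pvF n := by
  rw [pvF_apply, pvF_apply, pvF_apply]
  exact pvF_isMult.map_mul_of_coprime h

theorem pvF_one : pvF 1 = 1 := by decide

theorem pvF_prime {p : Nat} (hp : p.Prime) : pvF p = 1 + pvChi p := by
  unfold pvF
  rw [hp.divisors]
  rw [Finset.sum_pair (Nat.ne_of_lt hp.one_lt)]
  simp [pvChi_one]

theorem pvF_prime_pow {p : Nat} (hp : p.Prime) (e : Nat) :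
    pvF (p ^ e) = ∑ j ∈ Finset.range (e + 1), pvChi p ^ j := by
  unfold pvF
  rw [Nat.sum_divisors_prime_pow hp]
  exact Finset.sum_congr rfl fun j _ => pvChi_pow p j

theorem pvF_pp_one {p : Nat} (hp : p.Prime) (h1 : p % 4 = 1) (e : Nat) :
    pvF (p ^ e) = (e : Int) + 1 := by
  rw [pvF_prime_pow hp]
  simp [pvChi, h1]

theorem pvF_pp_three {p : Nat} (hp : p.Prime) (h3 : p % 4 = 3) (e : Nat) :
    pvF (p ^ e) = if e % 2 = 1 then 0 else 1 := by
  rw [pvF_prime_pow hp]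
  have hc : pvChi p = -1 := by simp [pvChi, h3]
  rw [hc, neg_one_geom_sum]
  rcases Nat.even_or_odd (e + 1) with h | h
  · rw [if_pos h]
    have he : e % 2 = 1 := by rcases h with ⟨k, hk⟩; omega
    rw [if_pos he]
  · have he : e % 2 = 0 := by rcases h with ⟨k, hk⟩; omega
    rw [if_neg (by rw [Nat.even_iff]; omega), if_neg (by omega)]

theorem pvF_two_pow (e : Nat) : pvF (2 ^ e) = 1 := by
  rw [pvF_prime_pow Nat.prime_two]
  have hc : pvChi 2 = 0 := by decide
  rw [hc]
  rw [Finset.sum_eq_single 0]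
  · norm_num
  · intro j _ hj; exact zero_pow hj
  · intro h; simp at h

theorem pvStripN_spec : ∀ (f n : Nat), n ≤ f → 1 ≤ n →
    pvStripN f n % 2 = 1 ∧ ∃ k, n = 2 ^ k * pvStripN f n := by
  intro f
  induction f with
  | zero => intro n hf h1; omega
  | succ f ih =>
    intro n hf h1
    rw [pvStripN]
    by_cases h : n % 2 = 0
    · rw [if_pos h]
      have h2 : n / 2 ≤ f := by omega
      have h3 : 1 ≤ n / 2 := by omega
      obtain ⟨ho, k, hk⟩ := ih (n / 2) h2 h3
      refine ⟨ho, k + 1, ?_⟩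
      calc n = 2 * (n / 2) := by omega
      _ = 2 * (2 ^ k * pvStripN f (n / 2)) := by rw [← hk]
      _ = 2 ^ (k + 1) * pvStripN f (n / 2) := by ring
    · rw [if_neg h]
      exact ⟨by omega, 0, by simp⟩

theorem pvDivOutN_spec : ∀ (f t i c : Nat), t ≤ f → 1 ≤ t → 2 ≤ i →
    ∃ e t', pvDivOutN f t i c = (t', c + e) ∧ t = i ^ e * t' ∧ ¬ (i ∣ t') := by
  intro f
  induction f with
  | zero => intro t i c hf h1 h2; omega
  | succ f ih =>
    intro t i c hf h1 h2
    rw [pvDivOutN]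
    by_cases h : t % i = 0
    · rw [if_pos h]
      have hd : i ∣ t := Nat.dvd_of_mod_eq_zero h
      have hlt : t / i < t := Nat.div_lt_self (by omega) (by omega)
      have h1' : 1 ≤ t / i := Nat.one_le_div_iff (by omega) |>.mpr (Nat.le_of_dvd (by omega) hd)
      obtain ⟨e, t', heq, hfac, hnd⟩ := ih (t / i) i (c + 1) (by omega) h1' h2
      refine ⟨e + 1, t', by rw [heq]; congr 1; omega, ?_, hnd⟩
      rw [pow_succ]
      calc t = i * (t / i) := (Nat.mul_div_cancel' hd).symm
      _ = i * (i ^ e * t') := by rw [← hfac]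
      _ = i ^ e * i * t' := by ring
    · rw [if_neg h]
      exact ⟨0, t, by simp, by simp, fun hd => h (by obtain ⟨k, rfl⟩ := hd; simp)⟩

theorem pvPrime_of_no_small (t i : Nat) (h2 : 2 ≤ t)
    (hb : ∀ p, p.Prime → p ∣ t → i ≤ p) (hlt : t < i * i) : t.Prime := by
  by_contra hnp
  have hf := Nat.minFac_prime (by omega : t ≠ 1)
  have hd := Nat.minFac_dvd t
  have hge := hb _ hf hd
  have hsq := Nat.minFac_sq_le_self (by omega) hnp
  have : i * i ≤ t.minFac * t.minFac := Nat.mul_le_mul hge hge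
  rw [pow_two] at hsq
  omega

theorem pvPrime_of_div (t i : Nat) (h2 : 2 ≤ i) (hd : i ∣ t) (ht : 1 ≤ t)
    (hb : ∀ p, p.Prime → p ∣ t → i ≤ p) : i.Prime := by
  have hf := Nat.minFac_prime (by omega : i ≠ 1)
  have hge := hb _ hf ((Nat.minFac_dvd i).trans hd)
  have hle := Nat.minFac_le (by omega : 0 < i)
  exact Nat.prime_def_minFac.mpr ⟨h2, by omega⟩

theorem pvBound_step (t t' i : Nat) (hodd : i % 2 = 1) (h3 : 3 ≤ i)
    (ht' : t' ∣ t) (hnd : ¬ i ∣ t')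
    (hb : ∀ p, p.Prime → p ∣ t → i ≤ p) :
    ∀ p, p.Prime → p ∣ t' → i + 2 ≤ p := by
  intro p hp hpd
  have hge := hb p hp (hpd.trans ht')
  have hne : p ≠ i := fun h => hnd (h ▸ hpd)
  have hne2 : p ≠ i + 1 := by
    intro h
    have hpe : p % 2 = 0 := by omega
    have hp2 : p = 2 := (Nat.Prime.even_iff hp).mp (Nat.even_iff.mpr hpe)
    omega
  omega

def pvFinishN : Option (Nat × Nat) → Int
  | none => 0
  | some (m, P) => if 1 < m then (if m % 4 = 3 then 0 else 4 * ((P : Int) * 2)) else 4 * (P : Int)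

theorem pvOddPrime_mod4 (t : Nat) (hp : t.Prime) (h3 : 3 ≤ t) : t % 4 = 1 ∨ t % 4 = 3 := by
  have ht2 : t % 2 = 1 := by
    rcases Nat.even_or_odd t with h | h
    · have h2 := (Nat.Prime.even_iff hp).mp h; omega
    · rcases h with ⟨k, hk⟩; omega
  omega

theorem pvFactN_spec : ∀ (f i t P : Nat), 1 ≤ t → i % 2 = 1 → 3 ≤ i →
    (∀ p, p.Prime → p ∣ t → i ≤ p) → t + 1 ≤ i + f →
    pvFinishN (pvFactN f i t P) = 4 * (P : Int) * pvF t := by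
  intro f
  induction f with
  | zero =>
    intro i t P h1 hodd h3 hb hf
    have ht1 : t = 1 := by
      by_contra hne
      have hfp := Nat.minFac_prime hne
      have := hb _ hfp (Nat.minFac_dvd t)
      have := Nat.minFac_le (by omega : 0 < t)
      omega
    subst ht1
    simp [pvFactN, pvFinishN, pvF_one]
  | succ f ih =>
    intro i t P h1 hodd h3 hb hf
    rw [pvFactN]
    by_cases hg : i * i ≤ t
    · have hit : i ≤ t := le_trans (Nat.le_mul_of_pos_left i (by omega)) hg
      by_cases hd : t % i = 0
      · rw [if_pos hg, if_pos hd]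
        have hdvd : i ∣ t := Nat.dvd_of_mod_eq_zero hd
        have hp : i.Prime := pvPrime_of_div t i (by omega) hdvd h1 hb
        obtain ⟨e, t', heq, hfac, hnd⟩ := pvDivOutN_spec (t+1) t i 0 (by omega) h1 (by omega)
        rw [show (0 + e = e) by omega] at heq
        simp only [heq]
        have ht'1 : 1 ≤ t' := by
          rcases Nat.eq_zero_or_pos t' with h | h
          · subst h; simp at hfac; omega
          · exact h
        have ht'le : t' ≤ t := by
          have : 1 ≤ i ^ e := Nat.one_le_pow _ _ (by omega)
          calc t' = 1 * t' := (one_mul t').symm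
          _ ≤ i ^ e * t' := Nat.mul_le_mul_right t' this
          _ = t := hfac.symm
        have hcop : Nat.Coprime (i ^ e) t' := Nat.Coprime.pow_left e ((Nat.Prime.coprime_iff_not_dvd hp).mpr hnd)
        have hFt : pvF t = pvF (i ^ e) * pvF t' := by rw [hfac, pvF_mul hcop]
        have hb' : ∀ p, p.Prime → p ∣ t' → i + 2 ≤ p :=
          pvBound_step t t' i hodd h3 ⟨i ^ e, by rw [hfac]; ring⟩ hnd hb
        have hf' : t' + 1 ≤ (i + 2) + f := by omega
        by_cases h4 : i % 4 = 3
        · rw [if_pos h4]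
          by_cases he : e % 2 = 1
          · rw [if_pos he]
            have : pvF (i ^ e) = 0 := by rw [pvF_pp_three hp h4, if_pos he]
            simp [pvFinishN, hFt, this]
          · rw [if_neg he]
            have hFe : pvF (i ^ e) = 1 := by rw [pvF_pp_three hp h4, if_neg he]
            rw [ih (i+2) t' P ht'1 (by omega) (by omega) hb' hf', hFt, hFe]
            ring
        · rw [if_neg h4]
          have h41 : i % 4 = 1 := by omega
          have hFe : pvF (i ^ e) = (e : Int) + 1 := pvF_pp_one hp h41 e
          rw [ih (i+2) t' (P * (e + 1)) ht'1 (by omega) (by omega) hb' hf', hFt, hFe]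
          push_cast
          ring
      · rw [if_pos hg, if_neg hd]
        have hnd : ¬ i ∣ t := fun hh => hd (by obtain ⟨k, rfl⟩ := hh; simp)
        have hb' : ∀ p, p.Prime → p ∣ t → i + 2 ≤ p :=
          pvBound_step t t i hodd h3 dvd_rfl hnd hb
        exact ih (i+2) t P h1 (by omega) (by omega) hb' (by omega)
    · rw [if_neg hg]
      rcases Nat.lt_or_ge 1 t with h2 | h2
      · have hp : t.Prime := pvPrime_of_no_small t i h2 hb (by omega)
        have h34 := pvOddPrime_mod4 t hp (le_trans h3 (hb t hp dvd_rfl))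
        simp only [pvFinishN, if_pos h2]
        rcases h34 with h | h
        · rw [if_neg (by omega), pvF_prime hp]
          have : pvChi t = 1 := by simp [pvChi, h]
          rw [this]; ring
        · rw [if_pos h, pvF_prime hp]
          have : pvChi t = -1 := by simp [pvChi, h]
          rw [this]; ring
      · have ht1 : t = 1 := by omega
        subst ht1
        simp [pvFinishN, pvF_one]

theorem pvCheckN_spec : ∀ (f i t : Nat), 1 ≤ t → i % 2 = 1 → 3 ≤ i →
    (∀ p, p.Prime → p ∣ t → i ≤ p) → t + 1 ≤ i + f →
    (pvCheckN f i t = none → pvF t = 0) ∧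
    (∀ m, pvCheckN f i t = some m → 1 < m → m % 4 = 3 → pvF t = 0) := by
  intro f
  induction f with
  | zero =>
    intro i t h1 hodd h3 hb hf
    have ht1 : t = 1 := by
      by_contra hne
      have hfp := Nat.minFac_prime hne
      have := hb _ hfp (Nat.minFac_dvd t)
      have := Nat.minFac_le (by omega : 0 < t)
      omega
    subst ht1
    exact ⟨fun h => by simp [pvCheckN] at h, fun m hm h1' h3' => by simp [pvCheckN] at hm; omega⟩
  | succ f ih =>
    intro i t h1 hodd h3 hb hf
    rw [pvCheckN]
    by_cases hg : i * i ≤ t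
    · have hit : i ≤ t := le_trans (Nat.le_mul_of_pos_left i (by omega)) hg
      by_cases hd : t % i = 0
      · rw [if_pos hg, if_pos hd]
        have hdvd : i ∣ t := Nat.dvd_of_mod_eq_zero hd
        have hp : i.Prime := pvPrime_of_div t i (by omega) hdvd h1 hb
        obtain ⟨e, t', heq, hfac, hnd⟩ := pvDivOutN_spec (t+1) t i 0 (by omega) h1 (by omega)
        rw [show (0 + e = e) by omega] at heq
        simp only [heq]
        have ht'1 : 1 ≤ t' := by
          rcases Nat.eq_zero_or_pos t' with h | h
          · subst h; simp at hfac; omega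
          · exact h
        have hcop : Nat.Coprime (i ^ e) t' := Nat.Coprime.pow_left e ((Nat.Prime.coprime_iff_not_dvd hp).mpr hnd)
        have hFt : pvF t = pvF (i ^ e) * pvF t' := by rw [hfac, pvF_mul hcop]
        have hb' : ∀ p, p.Prime → p ∣ t' → i + 2 ≤ p :=
          pvBound_step t t' i hodd h3 ⟨i ^ e, by rw [hfac]; ring⟩ hnd hb
        have hf' : t' + 1 ≤ (i + 2) + f := by
          have ht'le : t' ≤ t := by
            have h1e : 1 ≤ i ^ e := Nat.one_le_pow _ _ (by omega)
            calc t' = 1 * t' := (one_mul t').symm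
            _ ≤ i ^ e * t' := Nat.mul_le_mul_right t' h1e
            _ = t := hfac.symm
          omega
        obtain ⟨ihn, ihs⟩ := ih (i+2) t' ht'1 (by omega) (by omega) hb' hf'
        by_cases hcase : i % 4 = 3 ∧ e % 2 = 1
        · rw [if_pos hcase]
          refine ⟨fun _ => ?_, fun m hm => by simp at hm⟩
          have : pvF (i ^ e) = 0 := by rw [pvF_pp_three hp hcase.1, if_pos hcase.2]
          rw [hFt, this, zero_mul]
        · rw [if_neg hcase]
          exact ⟨fun h => by rw [hFt, ihn h]; ring,
                 fun m hm h1' h3' => by rw [hFt, ihs m hm h1' h3']; ring⟩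
      · rw [if_pos hg, if_neg hd]
        have hnd : ¬ i ∣ t := fun hh => hd (by obtain ⟨k, rfl⟩ := hh; simp)
        have hb' : ∀ p, p.Prime → p ∣ t → i + 2 ≤ p :=
          pvBound_step t t i hodd h3 dvd_rfl hnd hb
        exact ih (i+2) t h1 (by omega) (by omega) hb' (by omega)
    · rw [if_neg hg]
      refine ⟨fun h => by simp at h, fun m hm h1' h3' => ?_⟩
      have hmt : t = m := by simpa using hm
      subst hmt
      have hp : t.Prime := pvPrime_of_no_small t i h1' hb (by omega)
      rw [pvF_prime hp]
      have : pvChi t = -1 := by simp [pvChi, h3']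
      rw [this]; ring

theorem pvMin_eq_cases {n d i : Nat} (hn : 1 ≤ n) (hd : d ∣ n) (h : min d (n / d) = i) :
    d = i ∨ d = n / i := by
  rcases le_total d (n / d) with hle | hle
  · left; rw [min_eq_left hle] at h; exact h
  · right
    rw [min_eq_right hle] at h
    rw [← h]
    exact (Nat.div_div_self hd (by omega)).symm

theorem pvMin_sq_le {n d : Nat} (hn : 1 ≤ n) (hd : d ∣ n) :
    min d (n / d) * min d (n / d) ≤ n := by
  have hdn : d * (n / d) = n := Nat.mul_div_cancel' hd
  have h1 : min d (n / d) ≤ d := min_le_left _ _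
  have h2 : min d (n / d) ≤ n / d := min_le_right _ _
  calc min d (n / d) * min d (n / d) ≤ d * (n / d) := Nat.mul_le_mul h1 h2
  _ = n := hdn

theorem pvDivisorsN_spec : ∀ (f i n : Nat) (acc : List Nat), 1 ≤ n → 1 ≤ i → n + 2 ≤ i + f →
    ∃ l, pvDivisorsN f i n acc = acc ++ l ∧ l.Nodup ∧
      (∀ d, d ∈ l ↔ d ∣ n ∧ i ≤ min d (n / d)) := by
  intro f
  induction f with
  | zero =>
    intro i n acc hn hi hf
    refine ⟨[], by simp [pvDivisorsN], List.nodup_nil, fun d => ?_⟩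
    simp only [List.not_mem_nil, false_iff]
    rintro ⟨hd, hmin⟩
    have hd1 : 1 ≤ d := Nat.pos_of_dvd_of_pos hd hn
    have : d ≤ n := Nat.le_of_dvd hn hd
    have : min d (n / d) ≤ d := min_le_left _ _
    omega
  | succ f ih =>
    intro i n acc hn hi hf
    rw [pvDivisorsN]
    by_cases hg : i * i ≤ n
    · by_cases hd : n % i = 0
      · rw [if_pos hg, if_pos hd]
        have hdvd : i ∣ n := Nat.dvd_of_mod_eq_zero hd
        have hjj : n / (n / i) = i := Nat.div_div_self hdvd (by omega)
        have hilej : i ≤ n / i := (Nat.le_div_iff_mul_le (by omega)).mpr hg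
        have hjdvd : n / i ∣ n := ⟨i, (Nat.div_mul_cancel hdvd).symm⟩
        have hminI : min i (n / i) = i := min_eq_left hilej
        have hminJ : min (n / i) (n / (n / i)) = i := by rw [hjj]; exact min_eq_right hilej
        by_cases hj : n / i ≠ i
        · rw [if_pos (by simpa using hj)]
          obtain ⟨l', heq, hnd, hmem⟩ := ih (i+1) n (acc ++ [i, n / i]) hn (by omega) (by omega)
          refine ⟨i :: n / i :: l', by rw [heq]; simp, ?_, ?_⟩
          · refine List.Nodup.cons ?_ (List.Nodup.cons ?_ hnd)
            · intro hmm
              rcases List.mem_cons.mp hmm with h | h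
              · exact hj h.symm
              · have h2 := ((hmem i).mp h).2
                rw [hminI] at h2
                omega
            · intro hmm
              have h2 := ((hmem (n / i)).mp hmm).2
              rw [hminJ] at h2
              omega
          · intro d
            simp only [List.mem_cons]
            constructor
            · rintro (rfl | rfl | hmm)
              · exact ⟨hdvd, by rw [hminI]⟩
              · exact ⟨hjdvd, by rw [hminJ]⟩
              · obtain ⟨h1, h2⟩ := (hmem d).mp hmm
                exact ⟨h1, by omega⟩
            · rintro ⟨hddvd, hmin⟩
              by_cases hdi : d = i
              · exact Or.inl hdi
              by_cases hdj : d = n / i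
              · exact Or.inr (Or.inl hdj)
              · refine Or.inr (Or.inr ((hmem d).mpr ⟨hddvd, ?_⟩))
                rcases Nat.lt_or_ge (min d (n / d)) (i + 1) with hlt | hge
                · have heqi : min d (n / d) = i := by omega
                  rcases pvMin_eq_cases hn hddvd heqi with h | h
                  · exact absurd h hdi
                  · exact absurd h hdj
                · exact hge
        · rw [if_neg (by simpa using hj)]
          rw [not_not] at hj
          obtain ⟨l', heq, hnd, hmem⟩ := ih (i+1) n (acc ++ [i]) hn (by omega) (by omega)
          refine ⟨i :: l', by rw [heq]; simp, ?_, ?_⟩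
          · refine List.Nodup.cons ?_ hnd
            intro hmm
            have := (hmem i).mp hmm
            rw [hminI] at this
            omega
          · intro d
            simp only [List.mem_cons]
            constructor
            · rintro (rfl | hmm)
              · exact ⟨hdvd, by rw [hminI]⟩
              · obtain ⟨h1, h2⟩ := (hmem d).mp hmm
                exact ⟨h1, by omega⟩
            · rintro ⟨hddvd, hmin⟩
              by_cases hdi : d = i
              · exact Or.inl hdi
              · refine Or.inr ((hmem d).mpr ⟨hddvd, ?_⟩)
                rcases Nat.lt_or_ge (min d (n / d)) (i + 1) with hlt | hge
                · have heqi : min d (n / d) = i := by omega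
                  rcases pvMin_eq_cases hn hddvd heqi with h | h
                  · exact absurd h hdi
                  · rw [hj] at h; exact absurd h hdi
                · exact hge
      · rw [if_pos hg, if_neg hd]
        have hnd : ¬ i ∣ n := fun hh => hd (by obtain ⟨k, rfl⟩ := hh; simp)
        obtain ⟨l', heq, hndup, hmem⟩ := ih (i+1) n acc hn (by omega) (by omega)
        refine ⟨l', heq, hndup, fun d => ?_⟩
        rw [hmem d]
        constructor
        · rintro ⟨h1, h2⟩; exact ⟨h1, by omega⟩
        · rintro ⟨h1, h2⟩
          refine ⟨h1, ?_⟩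
          rcases Nat.lt_or_ge (min d (n / d)) (i + 1) with hlt | hge
          · have heqi : min d (n / d) = i := by omega
            rcases le_total d (n / d) with hle | hle
            · rw [min_eq_left hle] at heqi; exact absurd (heqi ▸ h1) hnd
            · rw [min_eq_right hle] at heqi
              have hdd : n / d ∣ n := ⟨d, (Nat.div_mul_cancel h1).symm⟩
              exact absurd (heqi ▸ hdd) hnd
          · exact hge
    · rw [if_neg hg]
      refine ⟨[], by simp, List.nodup_nil, fun d => ?_⟩
      simp only [List.not_mem_nil, false_iff]
      rintro ⟨hddvd, hmin⟩
      have := pvMin_sq_le hn hddvd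
      have : i * i ≤ min d (n / d) * min d (n / d) := Nat.mul_le_mul hmin hmin
      omega

theorem pvChiSum_counts (l : List Nat) :
    ((l.filter (fun d => d % 4 == 1)).length : Int) - ((l.filter (fun d => d % 4 == 3)).length : Int)
      = (l.map pvChi).sum := by
  induction l with
  | nil => simp
  | cons d l ih =>
    by_cases h1 : d % 4 = 1
    · simp only [List.filter_cons, List.map_cons, List.sum_cons, h1]
      rw [← ih]
      simp [pvChi, h1]
      push_cast
      ring
    · by_cases h3 : d % 4 = 3
      · simp only [List.filter_cons, List.map_cons, List.sum_cons, h3]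
        rw [← ih]
        simp [pvChi, h1, h3]
        push_cast
        ring
      · simp only [List.filter_cons, List.map_cons, List.sum_cons]
        rw [← ih]
        simp [pvChi, h1, h3]

theorem pvFilter_bridge (l : List Nat) (k : Nat) :
    ((pvCastL l).filter (fun d => PySem.Int.mod d 4 == (k : Int))).length
      = (l.filter (fun d => d % 4 == k)).length := by
  induction l with
  | nil => rfl
  | cons d l ih =>
    simp only [pvCastL, List.map_cons, List.filter_cons] at ih ⊢
    have hcond : (PySem.Int.mod (d : Int) 4 == (k : Int)) = (d % 4 == k) := by
      rw [show ((4:Int) = ((4:Nat):Int)) by norm_num, PySem.Int.mod_natCast]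
      by_cases hq : d % 4 = k
      · rw [beq_iff_eq.mpr hq]
        exact beq_iff_eq.mpr (by exact_mod_cast hq)
      · rw [beq_eq_false_iff_ne.mpr hq]
        exact beq_eq_false_iff_ne.mpr (fun hh => hq (by exact_mod_cast hh))
    rw [hcond]
    cases hb : (d % 4 == k)
    · simp only [hb, Bool.false_eq_true, if_false]
      exact ih
    · simp only [hb, if_true, List.length_cons]
      rw [ih]

theorem pvDivList_F (f n : Nat) (hn : 1 ≤ n) (hf : n + 2 ≤ 1 + f) :
    (((pvDivisorsN f 1 n []).filter (fun d => d % 4 == 1)).length : Int)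
      - (((pvDivisorsN f 1 n []).filter (fun d => d % 4 == 3)).length : Int) = pvF n := by
  obtain ⟨l, heq, hnodup, hmem⟩ := pvDivisorsN_spec f 1 n [] hn (by omega) hf
  rw [heq]
  simp only [List.nil_append]
  have hmem' : ∀ d, d ∈ l ↔ d ∈ n.divisors := by
    intro d
    rw [hmem d, Nat.mem_divisors]
    constructor
    · rintro ⟨h1, _⟩; exact ⟨h1, by omega⟩
    · rintro ⟨h1, _⟩
      refine ⟨h1, le_min (Nat.pos_of_dvd_of_pos h1 hn) (Nat.div_pos (Nat.le_of_dvd hn h1) (Nat.pos_of_dvd_of_pos h1 hn))⟩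
  have hfin : l.toFinset = n.divisors := Finset.ext (fun d => by rw [List.mem_toFinset]; exact hmem' d)
  rw [pvChiSum_counts l, ← List.sum_toFinset _ hnodup, hfin]
  rfl

theorem pvFinish_bridge (o : Option (Nat × Nat)) :
    (match o.map (fun q => ((q.1 : Int), (q.2 : Int))) with
     | none => (0 : Int)
     | some (m, prod) => if 1 < m then (if PySem.Int.mod m 4 = 3 then 0 else 4 * (prod * 2)) else 4 * prod)
      = pvFinishN o := by
  cases o with
  | none => rfl
  | some q =>
    obtain ⟨m, P⟩ := q
    simp only [Option.map_some, pvFinishN]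
    rw [show ((4:Int) = ((4:Nat):Int)) by norm_num, PySem.Int.mod_natCast]
    by_cases h1 : 1 < m
    · rw [if_pos (by exact_mod_cast h1), if_pos h1]
      by_cases h3 : m % 4 = 3
      · rw [if_pos (by exact_mod_cast h3), if_pos h3]
      · rw [if_neg (fun hh => h3 (by exact_mod_cast hh)), if_neg h3]
    · rw [if_neg (fun hh => h1 (by exact_mod_cast hh)), if_neg h1]

theorem pvStrip_facts (n : Nat) (hn : 1 ≤ n) :
    1 ≤ pvStripN (n+1) n ∧ pvStripN (n+1) n ≤ n ∧
    (∀ p, p.Prime → p ∣ pvStripN (n+1) n → 3 ≤ p) ∧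
    pvF n = pvF (pvStripN (n+1) n) := by
  obtain ⟨hodd, k, hk⟩ := pvStripN_spec (n+1) n (by omega) hn
  set n1 := pvStripN (n+1) n with hn1
  have h1 : 1 ≤ n1 := by
    rcases Nat.eq_zero_or_pos n1 with h | h
    · rw [h, Nat.mul_zero] at hk; omega
    · exact h
  have hle : n1 ≤ n := by
    have h2k : 1 ≤ 2^k := Nat.one_le_pow _ _ (by omega)
    calc n1 = 1 * n1 := (one_mul n1).symm
    _ ≤ 2^k * n1 := Nat.mul_le_mul_right n1 h2k
    _ = n := hk.symm
  have hb : ∀ p, p.Prime → p ∣ n1 → 3 ≤ p := by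
    intro p hp hpd
    have h2 := hp.two_le
    have hne : p ≠ 2 := by
      intro h
      subst h
      obtain ⟨c, hc⟩ := hpd
      omega
    omega
  have hcop : Nat.Coprime (2^k) n1 := by
    apply Nat.Coprime.pow_left
    have : ¬ (2 ∣ n1) := by
      intro ⟨c, hc⟩
      omega
    exact (Nat.Prime.coprime_iff_not_dvd Nat.prime_two).mpr this
  refine ⟨h1, hle, hb, ?_⟩
  rw [hk, pvF_mul hcop, pvF_two_pow, one_mul]



theorem pvAR2_eq_F (n : Nat) (hn : 1 ≤ n) :
    pvAR2 (n : Int) = 4 * pvF (pvStripN (n+1) n) := by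
  obtain ⟨h1, hle, hb, _⟩ := pvStrip_facts n hn
  set n1 := pvStripN (n+1) n with hn1
  rw [pvAR2, if_neg (by omega), if_neg (by omega)]
  simp only [Int.toNat_natCast]
  rw [pvAStrip_natCast, ← hn1]
  have hchk := pvACheck_natCast (n+2) 3 n1
  push_cast at hchk
  rw [hchk]
  obtain ⟨hnone, hsome⟩ := pvCheckN_spec (n+2) 3 n1 h1 (by norm_num) (by norm_num) hb (by omega)
  cases hc : pvCheckN (n + 2) 3 n1 with
  | none =>
    rw [hnone hc]
    norm_num
  | some m =>
    rw [Option.map_some]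
    split
    next heq => exact absurd heq (by simp)
    next tmp heq =>
    have htmp : tmp = (m : Int) := by injection heq with h; exact h.symm
    subst htmp
    by_cases hcond : 1 < m ∧ m % 4 = 3
    · rw [if_pos ⟨by exact_mod_cast hcond.1, by rw [show ((4:Int) = ((4:Nat):Int)) by norm_num, PySem.Int.mod_natCast]; exact_mod_cast hcond.2⟩]
      rw [hsome m hc hcond.1 hcond.2]
      ring
    · rw [if_neg (by
        rintro ⟨ha, hb'⟩
        rw [show ((4:Int) = ((4:Nat):Int)) by norm_num, PySem.Int.mod_natCast] at hb'
        exact hcond ⟨by exact_mod_cast ha, by exact_mod_cast hb'⟩)]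
      have hdiv := pvADivisors_natCast (n+2) 1 n1 []
      rw [pvCastL_nil] at hdiv
      push_cast at hdiv
      rw [hdiv]
      have hf1 := pvFilter_bridge (pvDivisorsN (n+2) 1 n1 []) 1
      have hf3 := pvFilter_bridge (pvDivisorsN (n+2) 1 n1 []) 3
      push_cast at hf1 hf3
      rw [hf1, hf3, pvDivList_F (n+2) n1 h1 (by omega)]

theorem pvBR2_eq_F (n : Nat) (hn : 1 ≤ n) :
    pvBR2 (n : Int) = 4 * pvF (pvStripN (n+1) n) := by
  obtain ⟨h1, hle, hb, _⟩ := pvStrip_facts n hn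
  set n1 := pvStripN (n+1) n with hn1
  rw [pvBR2, if_neg (by omega)]
  simp only [Int.toNat_natCast]
  rw [pvBStrip_natCast, ← hn1]
  have hbr := pvBFact_natCast (n+2) 3 n1 1
  push_cast at hbr
  rw [hbr]
  have hspec := pvFactN_spec (n+2) 3 n1 1 h1 (by norm_num) (by norm_num) hb (by omega)
  push_cast at hspec
  rw [← hspec, ← pvFinish_bridge (pvFactN (n + 2) 3 n1 1)]

theorem pvR2_cast (n : Nat) : pvAR2 (n : Int) = pvBR2 (n : Int) := by
  rcases Nat.eq_zero_or_pos n with h | h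
  · subst h; rfl
  · rw [pvAR2_eq_F n h, pvBR2_eq_F n h]

theorem pvLoop_eq (rsq : Int) : ∀ (xs : List Int) (tot : Int),
    (∀ x ∈ xs, 0 ≤ x ∧ x * x ≤ rsq) → pvALoop rsq xs tot = pvBLoop rsq xs tot := by
  intro xs
  induction xs with
  | nil => intro tot _; rfl
  | cons x xs ih =>
    intro tot hx
    obtain ⟨hx0, hxsq⟩ := hx x List.mem_cons_self
    rw [pvALoop, pvBLoop]
    have hrem : ¬ (rsq - x * x < 0) := by omega
    rw [if_neg hrem]
    have hcast : rsq - x * x = ((rsq - x * x).toNat : Int) := (Int.toNat_of_nonneg (by omega)).symm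
    rw [hcast, pvR2_cast]
    exact ih _ (fun y hy => hx y (List.mem_cons_of_mem x hy))

theorem pv_main (r : Int) (hr : 0 ≤ r) : compute_s_optimized r = compute_s_optimized_alt r := by
  rw [compute_s_optimized, compute_s_optimized_alt, if_neg (show ¬ (r < 0) by omega),
    if_neg (show ¬ (r < 0) by omega)]
  by_cases h0 : r = 0
  · subst h0
    rw [if_pos rfl]
    have : PySem.List.pyRange 1 (0 + 1) 1 = [] := by
      have hlen := PySem.List.length_pyRange_one (a := 1) (b := 0 + 1)
      rw [show ((0:Int) + 1 - 1 = 0) by ring] at hlen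
      exact List.eq_nil_of_length_eq_zero (by simpa using hlen)
    rw [this]
    rfl
  · rw [if_neg h0]
    apply pvLoop_eq
    intro x hx
    have hmem := (PySem.List.mem_pyRange_one).mp hx
    have hx1 : 1 ≤ x := hmem.1
    have hxr : x ≤ r := by omega
    exact ⟨by omega, mul_le_mul hxr hxr (by omega) hr⟩

-- ===== VERDICT (by name: the statement is the Claim_ definition above) =====
theorem compute_s_optimized_spec : Claim_equal_compute_s_optimized := by
  intro r _ hpre
  unfold Spec_compute_s_optimized
  exact pv_main r hpre
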